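-- pv_equiv track=rewrite | github.com/1225619779-alt/selfstudy | metric/case39/q1_top_sprint_20260424_094946/gate7_evidence_lock_20260425_215908/gate7_fresh_confirm.py | block_for_step
-- ===== SOURCE A (Python) =====
-- from typing import Any, Dict, List, Sequence, Tuple
--
-- def block_for_step(step: int) -> Tuple[int, str]:
--     blocks = [
--         (0, 119, "strong3_front"),
--         (120, 179, "clean_after_strong3"),
--         (180, 269, "strong2_mid"),
--         (270, 359, "clean_mid"),
--         (360, 419, "weak1_late"),
--         (420, 539, "clean_tail"),
--     ]
--     for i, (lo, hi, name) in enumerate(blocks):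
--         if lo <= int(step) <= hi:
--             return i, name
--     return -1, "unknown"
-- ===== SOURCE B (Python) =====
-- import bisect
--
-- _BOUNDS = [120, 180, 270, 360, 420, 540]
-- _NAMES = ["strong3_front", "clean_after_strong3", "strong2_mid",
--           "clean_mid", "weak1_late", "clean_tail"]
--
-- def block_for_step(step: int):
--     s = int(step)
--     if s < 0 or s > 539:
--         return -1, "unknown"
--     i = bisect.bisect_right(_BOUNDS, s)
--     return i, _NAMES[i]
-- ===== Notes on version B (the rewrite author's own statement) =====
-- stated objective: idiomatic
-- what changed: Replaces the sequential scan over (lo,hi,name) interval triples with a range guard plus bisect_right on a sorted boundary table and a parallel name list.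
import Mathlib
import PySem

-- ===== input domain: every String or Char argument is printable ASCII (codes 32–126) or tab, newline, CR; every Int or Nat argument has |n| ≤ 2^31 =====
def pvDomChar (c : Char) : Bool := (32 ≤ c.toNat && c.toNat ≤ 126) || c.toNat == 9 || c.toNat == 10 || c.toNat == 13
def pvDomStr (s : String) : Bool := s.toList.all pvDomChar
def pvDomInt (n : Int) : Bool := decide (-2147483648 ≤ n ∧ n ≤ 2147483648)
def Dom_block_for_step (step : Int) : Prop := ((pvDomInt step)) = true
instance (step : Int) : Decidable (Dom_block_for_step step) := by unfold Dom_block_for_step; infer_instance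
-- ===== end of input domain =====

-- B replaces A's sequential interval scan with a range guard + bisect_right on a
-- sorted boundary table and a parallel name list (idiomatic table lookup).

-- ===== PORT A =====
-- the literal blocks table of A
def pvBlocksA : List (Int × Int × String) :=
  [ (0, 119, "strong3_front"),
    (120, 179, "clean_after_strong3"),
    (180, 269, "strong2_mid"),
    (270, 359, "clean_mid"),
    (360, 419, "weak1_late"),
    (420, 539, "clean_tail") ]

-- the 'for i, (lo, hi, name) in enumerate(blocks)' loop, first match wins
def pvScanA (s : Int) : List (Int × Int × String) → Int → Int × String
  | [], _ => (-1, "unknown")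
  | (lo, hi, name) :: rest, i =>
      if lo ≤ s ∧ s ≤ hi then (i, name) else pvScanA s rest (i + 1)

def block_for_step (step : Int) : Int × String :=
  pvScanA step pvBlocksA 0

-- ===== PORT B =====
def pvBounds : List Int := [120, 180, 270, 360, 420, 540]
def pvNames : List String :=
  ["strong3_front", "clean_after_strong3", "strong2_mid",
   "clean_mid", "weak1_late", "clean_tail"]

-- bisect.bisect_right on a sorted list = number of elements ≤ s
def pvBisectRight (xs : List Int) (s : Int) : Nat :=
  xs.countP (fun b => decide (b ≤ s))

def block_for_step_alt (step : Int) : Int × String :=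
  if step < 0 ∨ step > 539 then (-1, "unknown")
  else
    let i := pvBisectRight pvBounds step
    ((i : Int), (PySem.List.pyGet? pvNames (i : Int)).getD "")

-- ===== PRECONDITION & SPEC =====
def Spec_block_for_step (step : Int) (out : Int × String) : Prop := out = block_for_step_alt step
instance (step : Int) (out : Int × String) : Decidable (Spec_block_for_step step out) := by unfold Spec_block_for_step; infer_instance

-- ===== CLAIM (what is proved, stated in full; the proofs are below) =====
def Claim_equal_block_for_step : Prop := ∀ (step : Int), Dom_block_for_step step → Spec_block_for_step step (block_for_step step)

-- ===== LEMMAS AND PROOFS =====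

-- ===== VERDICT (by name: the statement is the Claim_ definition above) =====
theorem block_for_step_spec : Claim_equal_block_for_step := by
  intro step _
  unfold Spec_block_for_step block_for_step block_for_step_alt pvBisectRight pvBounds pvNames
  rcases (by omega : step < 0 ∨ (0 ≤ step ∧ step ≤ 119) ∨ (120 ≤ step ∧ step ≤ 179) ∨ (180 ≤ step ∧ step ≤ 269) ∨ (270 ≤ step ∧ step ≤ 359) ∨ (360 ≤ step ∧ step ≤ 419) ∨ (420 ≤ step ∧ step ≤ 539) ∨ step > 539) with h|⟨h1,h2⟩|⟨h1,h2⟩|⟨h1,h2⟩|⟨h1,h2⟩|⟨h1,h2⟩|⟨h1,h2⟩|h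
  · simp [pvScanA, pvBlocksA, (show ¬(0 ≤ step ∧ step ≤ 119) by omega), (show ¬(120 ≤ step ∧ step ≤ 179) by omega), (show ¬(180 ≤ step ∧ step ≤ 269) by omega), (show ¬(270 ≤ step ∧ step ≤ 359) by omega), (show ¬(360 ≤ step ∧ step ≤ 419) by omega), (show ¬(420 ≤ step ∧ step ≤ 539) by omega), (show step < 0 by omega)]
  · simp [pvScanA, pvBlocksA, PySem.List.pyGet?, PySem.List.pyIdx?, (show 0 ≤ step by omega), (show step ≤ 119 by omega), (show ¬(step < 0 ∨ step > 539) by omega), (show ¬(120 ≤ step) by omega), (show ¬(180 ≤ step) by omega), (show ¬(270 ≤ step) by omega), (show ¬(360 ≤ step) by omega), (show ¬(420 ≤ step) by omega), (show ¬(540 ≤ step) by omega)]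
  · simp [pvScanA, pvBlocksA, PySem.List.pyGet?, PySem.List.pyIdx?, (show ¬(step ≤ 119) by omega), (show step ≤ 179 by omega), (show ¬(step < 0 ∨ step > 539) by omega), (show 120 ≤ step by omega), (show ¬(180 ≤ step) by omega), (show ¬(270 ≤ step) by omega), (show ¬(360 ≤ step) by omega), (show ¬(420 ≤ step) by omega), (show ¬(540 ≤ step) by omega)]
  · simp [pvScanA, pvBlocksA, PySem.List.pyGet?, PySem.List.pyIdx?, (show ¬(step ≤ 119) by omega), (show ¬(step ≤ 179) by omega), (show step ≤ 269 by omega), (show ¬(step < 0 ∨ step > 539) by omega), (show 120 ≤ step by omega), (show 180 ≤ step by omega), (show ¬(270 ≤ step) by omega), (show ¬(360 ≤ step) by omega), (show ¬(420 ≤ step) by omega), (show ¬(540 ≤ step) by omega)]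
  · simp [pvScanA, pvBlocksA, PySem.List.pyGet?, PySem.List.pyIdx?, (show ¬(step ≤ 119) by omega), (show ¬(step ≤ 179) by omega), (show ¬(step ≤ 269) by omega), (show step ≤ 359 by omega), (show ¬(step < 0 ∨ step > 539) by omega), (show 120 ≤ step by omega), (show 180 ≤ step by omega), (show 270 ≤ step by omega), (show ¬(360 ≤ step) by omega), (show ¬(420 ≤ step) by omega), (show ¬(540 ≤ step) by omega)]
  · simp [pvScanA, pvBlocksA, PySem.List.pyGet?, PySem.List.pyIdx?, (show ¬(step ≤ 119) by omega), (show ¬(step ≤ 179) by omega), (show ¬(step ≤ 269) by omega), (show ¬(step ≤ 359) by omega), (show step ≤ 419 by omega), (show ¬(step < 0 ∨ step > 539) by omega), (show 120 ≤ step by omega), (show 180 ≤ step by omega), (show 270 ≤ step by omega), (show 360 ≤ step by omega), (show ¬(420 ≤ step) by omega), (show ¬(540 ≤ step) by omega)]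
  · simp [pvScanA, pvBlocksA, PySem.List.pyGet?, PySem.List.pyIdx?, (show ¬(step ≤ 119) by omega), (show ¬(step ≤ 179) by omega), (show ¬(step ≤ 269) by omega), (show ¬(step ≤ 359) by omega), (show ¬(step ≤ 419) by omega), (show step ≤ 539 by omega), (show ¬(step < 0 ∨ step > 539) by omega), (show 120 ≤ step by omega), (show 180 ≤ step by omega), (show 270 ≤ step by omega), (show 360 ≤ step by omega), (show 420 ≤ step by omega), (show ¬(540 ≤ step) by omega)]
  · simp [pvScanA, pvBlocksA, (show ¬(step ≤ 119) by omega), (show ¬(step ≤ 179) by omega), (show ¬(step ≤ 269) by omega), (show ¬(step ≤ 359) by omega), (show ¬(step ≤ 419) by omega), (show ¬(step ≤ 539) by omega), (show step > 539 by omega)]
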